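-- pv_equiv track=rewrite | github.com/Sauciu1/bo-microfluidics | main.py | replace_bullet_points
-- ===== SOURCE A (Python) =====
-- def replace_bullet_points(text):
--     """
--     Convert Markdown-style bullet points to LaTeX itemize environment
--     """
--     lines = text.split("\n")
--     in_itemize = False
--     new_lines = []
--
--     for line in lines:
--         if line.startswith("- "):
--             if not in_itemize:
--                 new_lines.append("\\begin{itemize}")
--                 in_itemize = True
--             new_lines.append(f"\\item {line[2:].strip()}")
--         else:
--             if in_itemize:
--                 new_lines.append("\\end{itemize}")
--                 in_itemize = False
--             new_lines.append(line)
--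
--     if in_itemize:
--         new_lines.append("\\end{itemize}")
--
--     return "\n".join(new_lines)
-- ===== SOURCE B (Python) =====
-- def replace_bullet_points(text):
--     """
--     Convert Markdown-style bullet points to LaTeX itemize environment
--     """
--     lines = text.split("\n")
--     out = []
--     i = 0
--     n = len(lines)
--     while i < n:
--         if lines[i].startswith("- "):
--             j = i
--             while j < n and lines[j].startswith("- "):
--                 j += 1
--             out.append("\\begin{itemize}")
--             for l in lines[i:j]:
--                 out.append("\\item " + l[2:].strip())
--             out.append("\\end{itemize}")
--             i = j
--         else:
--             out.append(lines[i])
--             i += 1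
--     return "\n".join(out)
-- ===== Notes on version B (the rewrite author's own statement) =====
-- stated objective: alternative
-- what changed: Replaces A's line-by-line fold with an in_itemize boolean flag by a run-based two-pointer scan: each maximal run of bullet lines is located up front and emitted as one complete itemize block, so no cross-iteration state or trailing-close fixup is needed.
import Mathlib
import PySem

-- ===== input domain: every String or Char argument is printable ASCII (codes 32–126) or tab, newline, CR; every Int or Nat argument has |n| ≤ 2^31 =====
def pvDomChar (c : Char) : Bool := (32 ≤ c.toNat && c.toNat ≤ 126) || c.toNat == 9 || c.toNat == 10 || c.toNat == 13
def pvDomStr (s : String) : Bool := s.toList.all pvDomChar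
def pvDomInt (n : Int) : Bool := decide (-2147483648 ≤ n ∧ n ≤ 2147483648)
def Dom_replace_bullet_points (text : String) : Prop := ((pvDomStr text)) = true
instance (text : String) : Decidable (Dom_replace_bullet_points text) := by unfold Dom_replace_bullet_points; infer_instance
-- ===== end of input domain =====

-- B replaces A's line-by-line fold with an in_itemize flag by a run-based scan that emits each
-- maximal bullet run as one complete itemize block (objective: alternative decomposition).

-- ===== PORT A =====
-- the body of A's for-loop: state = (new_lines, in_itemize)
def pvStepA (st : List (List Char) × Bool) (line : List Char) : List (List Char) × Bool :=
  if PySem.Chars.startswith line ("- ".toList) then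
    let acc := if st.2 then st.1 else st.1 ++ ["\\begin{itemize}".toList]
    (acc ++ [("\\item ".toList) ++ PySem.Chars.strip (PySem.Chars.slice line (some 2) none)], true)
  else
    let acc := if st.2 then st.1 ++ ["\\end{itemize}".toList] else st.1
    (acc ++ [line], false)

def replace_bullet_points (text : String) : String :=
  let lines := PySem.Chars.splitOn text.toList ("\n".toList)
  let r := lines.foldl pvStepA ([], false)
  let newLines := if r.2 then r.1 ++ ["\\end{itemize}".toList] else r.1
  String.ofList (PySem.Chars.join ("\n".toList) newLines)

-- ===== PORT B =====
def pvIsBullet (l : List Char) : Bool := PySem.Chars.startswith l ("- ".toList)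

def pvItem (l : List Char) : List Char :=
  ("\\item ".toList) ++ PySem.Chars.strip (PySem.Chars.slice l (some 2) none)

-- the outer while-loop of B: consume a maximal bullet run, or a single plain line
def pvRunsB : List (List Char) → List (List Char)
  | [] => []
  | x :: xs =>
    if pvIsBullet x then
      ("\\begin{itemize}".toList)
        :: ((x :: xs.takeWhile pvIsBullet).map pvItem
            ++ ("\\end{itemize}".toList) :: pvRunsB (xs.dropWhile pvIsBullet))
    else
      x :: pvRunsB xs
  termination_by l => l.length
  decreasing_by
  · have := List.length_dropWhile_le pvIsBullet xs
    simp only [List.length_cons]; omega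
  · simp

def replace_bullet_points_alt (text : String) : String :=
  String.ofList (PySem.Chars.join ("\n".toList)
    (pvRunsB (PySem.Chars.splitOn text.toList ("\n".toList))))

-- ===== PRECONDITION & SPEC =====
def Spec_replace_bullet_points (text : String) (out : String) : Prop := out = replace_bullet_points_alt text
instance (text : String) (out : String) : Decidable (Spec_replace_bullet_points text out) := by unfold Spec_replace_bullet_points; infer_instance

-- ===== CLAIM (what is proved, stated in full; the proofs are below) =====
def Claim_equal_replace_bullet_points : Prop := ∀ (text : String), Dom_replace_bullet_points text → Spec_replace_bullet_points text (replace_bullet_points text)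

-- ===== LEMMAS AND PROOFS =====

-- A's result on a line list, exactly as A computes it (fold, then trailing close)
def pvFinA (lines : List (List Char)) (st : Bool) (acc : List (List Char)) : List (List Char) :=
  let r := lines.foldl pvStepA (acc, st)
  if r.2 then r.1 ++ ["\\end{itemize}".toList] else r.1

lemma pvFinA_cons (l : List Char) (ls : List (List Char)) (st : Bool) (acc : List (List Char)) :
    pvFinA (l :: ls) st acc = pvFinA ls (pvStepA (acc, st) l).2 (pvStepA (acc, st) l).1 := by
  simp [pvFinA]

lemma pvStepA_bullet (acc : List (List Char)) (st : Bool) (l : List Char)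
    (h : pvIsBullet l = true) :
    pvStepA (acc, st) l = ((if st then acc else acc ++ ["\\begin{itemize}".toList]) ++ [pvItem l], true) := by
  unfold pvStepA pvItem
  rw [show PySem.Chars.startswith l ("- ".toList) = true from h]
  simp

lemma pvStepA_plain (acc : List (List Char)) (st : Bool) (l : List Char)
    (h : pvIsBullet l = false) :
    pvStepA (acc, st) l = ((if st then acc ++ ["\\end{itemize}".toList] else acc) ++ [l], false) := by
  unfold pvStepA
  rw [show PySem.Chars.startswith l ("- ".toList) = false from h]
  simp

-- folding a run of bullet lines from state true just appends their items
lemma pvFoldA_run (run : List (List Char)) (h : ∀ l ∈ run, pvIsBullet l = true) :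
    ∀ acc, run.foldl pvStepA (acc, true) = (acc ++ run.map pvItem, true) := by
  induction run with
  | nil => intro acc; simp
  | cons y ys ih =>
    intro acc
    have hy : pvIsBullet y = true := h y (by simp)
    rw [List.foldl_cons, pvStepA_bullet _ _ _ hy, if_pos rfl,
        ih (fun l hl => h l (by simp [hl]))]
    simp

lemma pvFinA_run (run rest : List (List Char)) (h : ∀ l ∈ run, pvIsBullet l = true)
    (acc : List (List Char)) :
    pvFinA (run ++ rest) true acc = pvFinA rest true (acc ++ run.map pvItem) := by
  simp [pvFinA, List.foldl_append, pvFoldA_run run h acc]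

-- from state true, if the next line (if any) is not a bullet, A closes the block first
lemma pvFinA_true (rest : List (List Char)) (acc : List (List Char))
    (h : rest = [] ∨ ∃ y ys, rest = y :: ys ∧ pvIsBullet y = false) :
    pvFinA rest true acc = pvFinA rest false (acc ++ ["\\end{itemize}".toList]) := by
  rcases h with h | ⟨y, ys, rfl, hy⟩
  · subst h; simp [pvFinA]
  · rw [pvFinA_cons, pvFinA_cons, pvStepA_plain _ _ _ hy, pvStepA_plain _ _ _ hy]
    simp

-- main invariant: A's fold from state false produces exactly B's run-based output
lemma pvFinA_eq (lines : List (List Char)) :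
    ∀ acc, pvFinA lines false acc = acc ++ pvRunsB lines := by
  induction lines using pvRunsB.induct with
  | case1 => intro acc; simp [pvFinA, pvRunsB]
  | case2 x xs hx ih =>
    intro acc
    have hrun : ∀ l ∈ xs.takeWhile pvIsBullet, pvIsBullet l = true :=
      fun l hl => List.mem_takeWhile_imp hl
    have hrest : xs.dropWhile pvIsBullet = [] ∨
        ∃ y ys, xs.dropWhile pvIsBullet = y :: ys ∧ pvIsBullet y = false := by
      cases hd : xs.dropWhile pvIsBullet with
      | nil => exact Or.inl rfl
      | cons y ys =>
        refine Or.inr ⟨y, ys, rfl, ?_⟩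
        have := List.head_dropWhile_not pvIsBullet (l := xs) (by simp [hd])
        simpa [hd] using this
    calc pvFinA (x :: xs) false acc
        = pvFinA xs true (acc ++ ["\\begin{itemize}".toList, pvItem x]) := by
          rw [pvFinA_cons, pvStepA_bullet _ _ _ hx]
          simp
      _ = pvFinA (xs.takeWhile pvIsBullet ++ xs.dropWhile pvIsBullet) true
            (acc ++ ["\\begin{itemize}".toList, pvItem x]) := by
          rw [List.takeWhile_append_dropWhile]
      _ = pvFinA (xs.dropWhile pvIsBullet) true
            (acc ++ ["\\begin{itemize}".toList, pvItem x] ++ (xs.takeWhile pvIsBullet).map pvItem) :=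
          pvFinA_run _ _ hrun _
      _ = pvFinA (xs.dropWhile pvIsBullet) false
            (acc ++ ["\\begin{itemize}".toList, pvItem x] ++ (xs.takeWhile pvIsBullet).map pvItem
              ++ ["\\end{itemize}".toList]) :=
          pvFinA_true _ _ hrest
      _ = acc ++ pvRunsB (x :: xs) := by
          rw [ih]
          simp [pvRunsB, hx]
  | case3 x xs hx ih =>
    intro acc
    have hx' : pvIsBullet x = false := by simpa using hx
    rw [pvFinA_cons, pvStepA_plain _ _ _ hx']
    rw [if_neg (by simp), ih (acc ++ [x])]
    simp [pvRunsB, hx]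

-- ===== VERDICT (by name: the statement is the Claim_ definition above) =====
theorem replace_bullet_points_spec : Claim_equal_replace_bullet_points := by
  intro text _
  unfold Spec_replace_bullet_points replace_bullet_points replace_bullet_points_alt
  exact congrArg (fun nl => String.ofList (PySem.Chars.join ("\n".toList) nl))
    (by simpa [pvFinA] using pvFinA_eq (PySem.Chars.splitOn text.toList ("\n".toList)) [])
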